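-- pv_equiv track=rewrite | github.com/beglad2025/learn_python | day_27.py | getPrintTime
-- ===== SOURCE A (Python) =====
-- def getPrintTime(p1, p2, page):
--     prt_page = 0
--     time = 0
--     while prt_page < page:
--         time += 1
--         if time % p1 == 0:
--             prt_page += 1
--         if time % p2 == 0:
--             prt_page += 1
--     return time
-- ===== SOURCE B (Python) =====
-- def getPrintTime(p1, p2, page):
--     if page <= 0:
--         return 0
--     a, b = abs(p1), abs(p2)
--     lo, hi = 1, min(a, b) * page
--     while lo < hi:
--         mid = (lo + hi) // 2
--         if mid // a + mid // b >= page: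
--             hi = mid
--         else:
--             lo = mid + 1
--     return lo
-- ===== Notes on version B (the rewrite author's own statement) =====
-- stated objective: faster
-- what changed: Replaced the minute-by-minute simulation loop with a binary search for the smallest t with t//|p1| + t//|p2| >= page.
-- outside the precondition, e.g. on getPrintTime(0, 3, 5): A raises ZeroDivisionError, B returns 1
import Mathlib
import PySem

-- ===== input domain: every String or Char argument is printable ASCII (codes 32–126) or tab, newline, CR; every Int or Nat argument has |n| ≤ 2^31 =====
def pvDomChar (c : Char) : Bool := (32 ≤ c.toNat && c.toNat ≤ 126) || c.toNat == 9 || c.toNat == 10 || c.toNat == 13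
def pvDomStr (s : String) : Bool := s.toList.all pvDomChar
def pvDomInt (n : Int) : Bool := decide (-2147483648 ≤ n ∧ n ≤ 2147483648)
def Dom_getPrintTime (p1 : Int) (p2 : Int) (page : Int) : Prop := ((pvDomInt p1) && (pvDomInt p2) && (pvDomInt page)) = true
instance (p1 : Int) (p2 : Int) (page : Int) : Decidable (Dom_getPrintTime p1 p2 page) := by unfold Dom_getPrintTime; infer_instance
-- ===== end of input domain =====

-- B replaces A's minute-by-minute simulation with a binary search for the smallest
-- t with t//|p1| + t//|p2| >= page (objective: faster, asymptotically).


-- ===== PORT A =====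
-- A's while loop, step for step; `fuel` is only a totality bound (inside Pre_ the
-- loop exits before the fuel runs out).
def pvLoopA (p1 p2 page : Int) : Nat → Int → Int → Int
  | 0, _, time => time
  | Nat.succ fuel, prt_page, time =>
    if prt_page < page then
      let time' := time + 1
      let prt' := if PySem.Int.mod time' p1 = 0 then prt_page + 1 else prt_page
      let prt'' := if PySem.Int.mod time' p2 = 0 then prt' + 1 else prt'
      pvLoopA p1 p2 page fuel prt'' time'
    else time

def getPrintTime (p1 : Int) (p2 : Int) (page : Int) : Int :=
  pvLoopA p1 p2 page ((min |p1| |p2| * page).toNat) 0 0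

-- ===== PORT B =====
-- B's binary-search loop (Source B); structural recursion on the interval width.
def pvLoopB (a b page : Int) : Nat → Int → Int → Int
  | 0, lo, _ => lo
  | Nat.succ fuel, lo, hi =>
    if lo < hi then
      let mid := PySem.Int.floordiv (lo + hi) 2
      if page ≤ PySem.Int.floordiv mid a + PySem.Int.floordiv mid b then
        pvLoopB a b page fuel lo mid
      else
        pvLoopB a b page fuel (mid + 1) hi
    else lo

def getPrintTime_alt (p1 : Int) (p2 : Int) (page : Int) : Int :=
  if page ≤ 0 then 0
  else
    let a := |p1|
    let b := |p2|
    pvLoopB a b page ((min a b * page - 1).toNat) 1 (min a b * page)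

-- ===== PRECONDITION & SPEC =====
-- Pre_ excludes exactly the inputs on which A raises ZeroDivisionError
-- (page > 0 with p1 = 0 or p2 = 0); everywhere A returns, it is admitted.
def Pre_getPrintTime (p1 : Int) (p2 : Int) (page : Int) : Prop :=
  page ≤ 0 ∨ (p1 ≠ 0 ∧ p2 ≠ 0)
instance (p1 : Int) (p2 : Int) (page : Int) : Decidable (Pre_getPrintTime p1 p2 page) := by
  unfold Pre_getPrintTime; infer_instance

def pvWitness_getPrintTime : Int × Int × Int := (3, 5, 4)

def Spec_getPrintTime (p1 : Int) (p2 : Int) (page : Int) (out : Int) : Prop := out = getPrintTime_alt p1 p2 page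
instance (p1 : Int) (p2 : Int) (page : Int) (out : Int) : Decidable (Spec_getPrintTime p1 p2 page out) := by unfold Spec_getPrintTime; infer_instance

-- ===== CLAIM (what is proved, stated in full; the proofs are below) =====
def Claim_equal_getPrintTime : Prop := ∀ (p1 : Int) (p2 : Int) (page : Int), Dom_getPrintTime p1 p2 page → Pre_getPrintTime p1 p2 page → Spec_getPrintTime p1 p2 page (getPrintTime p1 p2 page)

-- ===== LEMMAS AND PROOFS =====

-- pages printed by minute t (a, b the positive periods)
def pvPages (a b t : Int) : Int := t / a + t / b

theorem pvPages_mono (a b : Int) (ha : 0 < a) (hb : 0 < b) {s t : Int} (h : s ≤ t) :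
    pvPages a b s ≤ pvPages a b t := by
  unfold pvPages
  exact add_le_add (Int.ediv_le_ediv ha h) (Int.ediv_le_ediv hb h)

theorem pv_ediv_succ (a t : Int) (ha : 0 < a) :
    (t + 1) / a = t / a + (if a ∣ (t + 1) then 1 else 0) := by
  by_cases hd : a ∣ (t + 1)
  · obtain ⟨q, hq⟩ := hd
    rw [if_pos ⟨q, hq⟩]
    have h1 : t = (a - 1) + a * (q - 1) := by linarith
    have h2 : t / a = (a - 1) / a + (q - 1) := by
      have := congrArg (· / a) h1
      simp only at this
      rw [this, Int.add_mul_ediv_left _ _ (by omega : a ≠ 0)]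
    have h3 : (a - 1) / a = 0 := Int.ediv_eq_zero_of_lt (by omega) (by omega)
    have h4 : (t + 1) / a = q := by
      rw [hq]; exact Int.mul_ediv_cancel_left _ (by omega)
    omega
  · rw [if_neg hd, add_zero]
    have hr0 : (t + 1) % a ≠ 0 := fun h => hd (Int.dvd_of_emod_eq_zero h)
    have hre : (t + 1) % a = t + 1 - a * ((t + 1) / a) := Int.emod_def _ _
    have hrnn : 0 ≤ (t + 1) % a := Int.emod_nonneg _ (by omega)
    have hrlt : (t + 1) % a < a := Int.emod_lt_of_pos _ ha
    have h1 : t = ((t + 1) % a - 1) + a * ((t + 1) / a) := by omega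
    have h2 : t / a = ((t + 1) % a - 1) / a + ((t + 1) / a) := by
      have := congrArg (· / a) h1
      simp only at this
      rw [this, Int.add_mul_ediv_left _ _ (by omega : a ≠ 0)]
    have h3 : ((t + 1) % a - 1) / a = 0 := Int.ediv_eq_zero_of_lt (by omega) (by omega)
    omega

theorem pvPages_succ (a b t : Int) (ha : 0 < a) (hb : 0 < b) :
    pvPages a b (t + 1) =
      pvPages a b t + (if a ∣ (t + 1) then 1 else 0) + (if b ∣ (t + 1) then 1 else 0) := by
  unfold pvPages
  rw [pv_ediv_succ a t ha, pv_ediv_succ b t hb]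
  ring

theorem pvLoopA_spec (p1 p2 page : Int) (hp1 : p1 ≠ 0) (hp2 : p2 ≠ 0) (t : Int)
    (ht : page ≤ pvPages |p1| |p2| t)
    (hmin : ∀ s, 0 ≤ s → s < t → pvPages |p1| |p2| s < page) :
    ∀ (fuel : Nat) (time : Int), 0 ≤ time → time ≤ t →
      (t - time).toNat ≤ fuel →
      pvLoopA p1 p2 page fuel (pvPages |p1| |p2| time) time = t := by
  intro fuel
  induction fuel with
  | zero =>
    intro time h0 hle hf
    have : time = t := by omega
    simpa [pvLoopA] using this
  | succ n ih =>
    intro time h0 hle hf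
    by_cases hcond : pvPages |p1| |p2| time < page
    · have hlt : time < t := by
        rcases lt_or_eq_of_le hle with h | h
        · exact h
        · exfalso; rw [h] at hcond; omega
      have hd1 : (PySem.Int.mod (time + 1) p1 = 0) ↔ (|p1| ∣ (time + 1)) := by
        rw [PySem.Int.mod_eq_zero_iff_dvd]
        exact ⟨fun h => (abs_dvd _ _).mpr h, fun h => (abs_dvd _ _).mp h⟩
      have hd2 : (PySem.Int.mod (time + 1) p2 = 0) ↔ (|p2| ∣ (time + 1)) := by
        rw [PySem.Int.mod_eq_zero_iff_dvd]
        exact ⟨fun h => (abs_dvd _ _).mpr h, fun h => (abs_dvd _ _).mp h⟩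
      have hstep := pvPages_succ |p1| |p2| time (abs_pos.mpr hp1) (abs_pos.mpr hp2)
      have hrec := ih (time + 1) (by omega) (by omega) (by omega)
      simp only [pvLoopA, if_pos hcond]
      have harg :
          (if PySem.Int.mod (time + 1) p2 = 0 then
              (if PySem.Int.mod (time + 1) p1 = 0 then pvPages |p1| |p2| time + 1
               else pvPages |p1| |p2| time) + 1
            else
              (if PySem.Int.mod (time + 1) p1 = 0 then pvPages |p1| |p2| time + 1
               else pvPages |p1| |p2| time)) = pvPages |p1| |p2| (time + 1) := by
        rw [hstep]
        by_cases hA : |p1| ∣ (time + 1) <;> by_cases hB : |p2| ∣ (time + 1) <;>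
          simp [hd1, hd2, hA, hB]
      rw [harg]
      exact hrec
    · push_neg at hcond
      have : ¬ time < t := fun h => by have := hmin time h0 h; omega
      have heq : time = t := by omega
      simp only [pvLoopA]
      rw [if_neg (not_lt.mpr hcond)]
      exact heq

theorem pvLoopB_spec (a b page : Int) (ha : 0 < a) (hb : 0 < b) (t : Int)
    (ht : page ≤ pvPages a b t)
    (hmin : ∀ s, 1 ≤ s → page ≤ pvPages a b s → t ≤ s) :
    ∀ (n : Nat) (lo hi : Int), (hi - lo).toNat ≤ n → 1 ≤ lo → lo ≤ t → t ≤ hi →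
      pvLoopB a b page n lo hi = t := by
  intro n
  induction n with
  | zero =>
    intro lo hi hw h1 h2 h3
    simp only [pvLoopB]
    omega
  | succ n ih =>
    intro lo hi hw h1 h2 h3
    by_cases h : lo < hi
    · simp only [pvLoopB]
      rw [if_pos h]
      set m := PySem.Int.floordiv (lo + hi) 2 with hm
      have hbnd := PySem.Int.floordiv_two_mid_bounds (le_of_lt h)
      have hmid2 : PySem.Int.floordiv (lo + hi) 2 * 2 + PySem.Int.mod (lo + hi) 2 = lo + hi :=
        PySem.Int.floordiv_mul_add_mod (lo + hi) 2
      have hmv := PySem.Int.mod_eq_emod_of_pos (a := lo + hi) (b := 2) (by omega)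
      have hmnn : 0 ≤ PySem.Int.mod (lo + hi) 2 := by
        rw [hmv]; exact Int.emod_nonneg _ (by omega)
      have hmlt : PySem.Int.mod (lo + hi) 2 < 2 := by
        rw [hmv]; exact Int.emod_lt_of_pos _ (by omega)
      have hmidlt : m < hi := by omega
      have hmidge : lo ≤ m := by omega
      have hda : PySem.Int.floordiv m a = m / a := PySem.Int.floordiv_eq_ediv_of_pos ha
      have hdb : PySem.Int.floordiv m b = m / b := PySem.Int.floordiv_eq_ediv_of_pos hb
      show (if page ≤ PySem.Int.floordiv m a + PySem.Int.floordiv m b then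
          pvLoopB a b page n lo m else pvLoopB a b page n (m + 1) hi) = t
      split_ifs with hc
      · -- pages at m reach page: answer ≤ m
        have hpm : page ≤ pvPages a b m := by unfold pvPages; rw [← hda, ← hdb]; exact hc
        have htm : t ≤ m := hmin m (by omega) hpm
        exact ih lo m (by omega) h1 h2 htm
      · -- pages at m below page: answer > m
        have hpm : pvPages a b m < page := by
          unfold pvPages; rw [← hda, ← hdb]; omega
        have hmt : m + 1 ≤ t := by
          by_contra hcon
          push_neg at hcon
          have := pvPages_mono a b ha hb (show t ≤ m by omega)
          omega
        exact ih (m + 1) hi (by omega) (by omega) hmt h3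
    · simp only [pvLoopB]
      rw [if_neg h]
      omega

-- existence of the least crossing time, as a Nat search
theorem pv_exists_least (a b page : Int) (ha : 0 < a) (hb : 0 < b) (hpg : 0 < page) :
    ∃ t : Int, 1 ≤ t ∧ t ≤ min a b * page ∧ page ≤ pvPages a b t ∧
      ∀ s, 1 ≤ s → page ≤ pvPages a b s → t ≤ s := by
  have hT : page ≤ pvPages a b (min a b * page) := by
    unfold pvPages
    rcases le_total a b with hab | hab
    · have h1 : min a b = a := min_eq_left hab
      have h2 : (a * page) / a = page := by
        rw [mul_comm]; exact Int.mul_ediv_cancel _ (by omega)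
      have h3 : 0 ≤ (a * page) / b := Int.ediv_nonneg (by positivity) (by omega)
      rw [h1]; omega
    · have h1 : min a b = b := min_eq_right hab
      have h2 : (b * page) / b = page := by
        rw [mul_comm]; exact Int.mul_ediv_cancel _ (by omega)
      have h3 : 0 ≤ (b * page) / a := Int.ediv_nonneg (by positivity) (by omega)
      rw [h1]; omega
  -- search over Nat
  have hne : ∃ n : Nat, page ≤ pvPages a b (n : Int) := by
    refine ⟨(min a b * page).toNat, ?_⟩
    have : ((min a b * page).toNat : Int) = min a b * page := by
      rw [Int.toNat_of_nonneg]; positivity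
    rw [this]; exact hT
  classical
  let n0 := Nat.find hne
  have hfind : page ≤ pvPages a b (n0 : Int) := Nat.find_spec hne
  have hmin' : ∀ m : Nat, m < n0 → ¬ page ≤ pvPages a b (m : Int) := fun m hm =>
    Nat.find_min hne hm
  have h0 : pvPages a b 0 < page := by
    unfold pvPages; simp [Int.zero_ediv]; omega
  have hn0pos : 1 ≤ (n0 : Int) := by
    rcases Nat.eq_zero_or_pos n0 with h | h
    · exfalso; rw [h] at hfind; simp at hfind; omega
    · exact_mod_cast h
  refine ⟨(n0 : Int), hn0pos, ?_, hfind, ?_⟩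
  · by_contra hcon
    push_neg at hcon
    have hlt : ((min a b * page).toNat : Nat) < n0 := by
      have : ((min a b * page).toNat : Int) = min a b * page := by
        rw [Int.toNat_of_nonneg]; positivity
      omega
    have := hmin' _ hlt
    rw [show (((min a b * page).toNat : Nat) : Int) = min a b * page by
      rw [Int.toNat_of_nonneg]; positivity] at this
    exact this hT
  · intro s hs hps
    have hs0 : 0 ≤ s := by omega
    have hcast : s = (s.toNat : Int) := (Int.toNat_of_nonneg hs0).symm
    by_contra hcon
    push_neg at hcon
    have hlt : s.toNat < n0 := by omega
    exact hmin' s.toNat hlt (by rw [← hcast]; exact hps)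

-- ===== VERDICT (by name: the statement is the Claim_ definition above) =====
theorem getPrintTime_spec : Claim_equal_getPrintTime := by
  intro p1 p2 page _ hpre
  unfold Spec_getPrintTime getPrintTime getPrintTime_alt
  by_cases hpg : page ≤ 0
  · -- loop never runs; both return 0
    simp only [if_pos hpg]
    have : (min |p1| |p2| * page).toNat = (min |p1| |p2| * page).toNat := rfl
    cases hfu : (min |p1| |p2| * page).toNat with
    | zero => simp [pvLoopA]
    | succ n => simp [pvLoopA, not_lt.mpr hpg]
  · push_neg at hpg
    rcases hpre with h | ⟨hp1, hp2⟩
    · omega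
    have ha : (0:Int) < |p1| := abs_pos.mpr hp1
    have hb : (0:Int) < |p2| := abs_pos.mpr hp2
    obtain ⟨t, ht1, htT, htp, htm⟩ := pv_exists_least |p1| |p2| page ha hb hpg
    have hmin0 : ∀ s, 0 ≤ s → s < t → pvPages |p1| |p2| s < page := by
      intro s hs0 hst
      by_contra hcon
      push_neg at hcon
      rcases Int.lt_or_le 0 s with hsp | hsn
      · have := htm s (by omega) hcon
        omega
      · have hs0' : s = 0 := by omega
        rw [hs0'] at hcon
        unfold pvPages at hcon
        simp [Int.zero_ediv] at hcon
        omega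
    have hA : pvLoopA p1 p2 page ((min |p1| |p2| * page).toNat) (pvPages |p1| |p2| 0) 0 = t := by
      apply pvLoopA_spec p1 p2 page hp1 hp2 t htp hmin0
      · omega
      · omega
      · omega
    have h0 : pvPages |p1| |p2| 0 = 0 := by unfold pvPages; simp [Int.zero_ediv]
    rw [h0] at hA
    have hB : pvLoopB |p1| |p2| page ((min |p1| |p2| * page - 1).toNat) 1 (min |p1| |p2| * page) = t := by
      exact pvLoopB_spec |p1| |p2| page ha hb t htp htm (min |p1| |p2| * page - 1).toNat 1 (min |p1| |p2| * page) (by omega) le_rfl ht1 htT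
    simp only [if_neg (not_le.mpr hpg)]
    rw [hA, hB]
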